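-- pv_equiv track=rewrite | github.com/seiichikick0404/coding-problems | practice/C - Medicine.py | find_day
-- ===== SOURCE A (Python) =====
-- def find_day(n, k, medicines):
--     ok = 1 << 30  # 初期化された上限値
--     ng = 0  # 初期化された下限値
--     while abs(ok - ng) > 1:
--         mid = (ok + ng) // 2
--         sum = 0
--         for duration, pills_per_day in medicines:
--             if mid <= duration:
--                 sum += pills_per_day
--         if sum <= k:
--             ok = mid
--         else:
--             ng = mid
--     return ok
-- ===== SOURCE B (Python) =====
-- def find_day(n, k, medicines):
--     # Sort once by duration, precompute suffix pill sums, answer g-queries by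
--     # binary search on the index, and build the answer bit by bit (top-down).
--     meds = sorted(medicines, key=lambda m: m[0])
--     durs = [d for d, _ in meds]
--     m = len(meds)
--     suffix = [0] * (m + 1)
--     for i in range(m - 1, -1, -1):
--         suffix[i] = suffix[i + 1] + meds[i][1]
--
--     def need(day):
--         lo, hi = 0, m
--         while lo < hi:
--             mid = (lo + hi) // 2
--             if durs[mid] < day:
--                 lo = mid + 1
--             else:
--                 hi = mid
--         return suffix[lo]
--
--     ans = 0
--     for i in range(29, -1, -1):
--         step = 1 << i
--         if need(ans + step) > k:
--             ans += step
--     return ans + 1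
-- ===== Notes on version B (the rewrite author's own statement) =====
-- stated objective: alternative
-- what changed: Replaces the interval binary search with a linear scan per probe by a sort-once + suffix-sum table queried by index bisection, with the answer assembled bit by bit from the top; each of the 30 probes costs O(log m) instead of O(m).
import Mathlib
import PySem

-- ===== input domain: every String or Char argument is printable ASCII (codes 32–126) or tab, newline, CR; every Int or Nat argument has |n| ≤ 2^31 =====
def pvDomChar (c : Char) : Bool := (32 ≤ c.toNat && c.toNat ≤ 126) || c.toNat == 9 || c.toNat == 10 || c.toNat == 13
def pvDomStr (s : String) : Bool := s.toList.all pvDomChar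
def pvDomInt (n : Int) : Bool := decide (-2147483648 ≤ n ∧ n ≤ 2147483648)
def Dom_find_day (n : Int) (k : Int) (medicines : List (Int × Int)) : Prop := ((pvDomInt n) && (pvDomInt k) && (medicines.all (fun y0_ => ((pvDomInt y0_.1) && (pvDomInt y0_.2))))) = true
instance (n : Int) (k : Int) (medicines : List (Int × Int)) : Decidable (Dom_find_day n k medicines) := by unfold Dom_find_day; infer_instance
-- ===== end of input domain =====

-- B replaces A's binary search over days (each probe a full scan of the list) by a
-- sorted duration table with suffix pill sums, index bisection per probe, and a
-- bitwise top-down construction of the answer (alternative decomposition).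

-- ===== PORT A =====
-- inner 'for duration, pills_per_day in medicines' accumulation
def sumA (mid : Int) (medicines : List (Int × Int)) : Int :=
  medicines.foldl (fun s m => if mid ≤ m.1 then s + m.2 else s) 0

-- the 'while abs(ok - ng) > 1' loop
def loopA (k : Int) (medicines : List (Int × Int)) (ok ng : Int) : Int :=
  if h : |ok - ng| > 1 then
    let mid := PySem.Int.floordiv (ok + ng) 2
    if sumA mid medicines ≤ k then loopA k medicines mid ng
    else loopA k medicines ok mid
  else ok
termination_by (ok - ng).natAbs
decreasing_by
  all_goals
    have h2 : PySem.Int.floordiv (ok + ng) 2 = (ok + ng) / 2 := by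
      unfold PySem.Int.floordiv; rw [Int.fdiv_eq_ediv]; simp
    rw [Int.abs_eq_natAbs] at h
    simp only [h2] at *
    omega

def find_day (n : Int) (k : Int) (medicines : List (Int × Int)) : Int :=
  loopA k medicines 1073741824 0   -- ok = 1 << 30, ng = 0

-- ===== PORT B =====
-- suffix = [0]*(m+1); for i in range(m-1,-1,-1): suffix[i] = suffix[i+1] + meds[i][1]
-- (the array is built back-to-front; this structural recursion produces the same list)
def suffixSums : List (Int × Int) → List Int
  | [] => [0]
  | p :: t => let s := suffixSums t; (s.headD 0 + p.2) :: s

-- the hand-written bisect_left 'while lo < hi' loop of Source B (indices are always in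
-- range, so durs[mid] is ported as getD; Nat division = Python // on these nonnegatives)
def bsB (durs : List Int) (day : Int) (lo hi : Nat) : Nat :=
  if lo < hi then
    let mid := (lo + hi) / 2
    if durs.getD mid 0 < day then bsB durs day (mid + 1) hi
    else bsB durs day lo mid
  else lo
termination_by hi - lo
decreasing_by all_goals omega

def find_day_alt (n : Int) (k : Int) (medicines : List (Int × Int)) : Int :=
  let meds := PySem.List.sorted medicines (fun m => m.1) false
  let durs := meds.map (fun m => m.1)
  let m := meds.length
  let suffix := suffixSums meds
  let need := fun (day : Int) => suffix.getD (bsB durs day 0 m) 0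
  let ans := (PySem.List.pyRange 29 (-1) (-1)).foldl
    (fun ans i =>
      -- step = 1 << i = 2 ^ i, exact since 0 ≤ i ≤ 29
      if need (ans + 2 ^ i.toNat) > k then ans + 2 ^ i.toNat else ans) 0
  ans + 1

-- ===== PRECONDITION & SPEC =====
def Spec_find_day (n : Int) (k : Int) (medicines : List (Int × Int)) (out : Int) : Prop := out = find_day_alt n k medicines
instance (n : Int) (k : Int) (medicines : List (Int × Int)) (out : Int) : Decidable (Spec_find_day n k medicines out) := by unfold Spec_find_day; infer_instance

-- ===== CLAIM (what is proved, stated in full; the proofs are below) =====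
def Claim_equal_find_day : Prop := ∀ (n : Int) (k : Int) (medicines : List (Int × Int)), Dom_find_day n k medicines → Spec_find_day n k medicines (find_day n k medicines)

-- ===== LEMMAS AND PROOFS =====

theorem suffixSums_getD (meds : List (Int × Int)) :
    ∀ i : Nat, i ≤ meds.length →
      (suffixSums meds).getD i 0 = ((meds.drop i).map (fun m => m.2)).sum := by
  induction meds with
  | nil =>
    intro i hi
    have : i = 0 := by simpa using hi
    subst this; simp [suffixSums]
  | cons p t ih =>
    intro i hi
    cases i with
    | zero =>
      have h0 : (suffixSums t).headD 0 = (suffixSums t).getD 0 0 := by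
        cases h : suffixSums t <;> simp [List.getD]
      simp only [suffixSums, List.getD_cons_zero, h0, ih 0 (by omega)]
      simp [List.map_cons]; ring
    | succ i' =>
      simp only [suffixSums, List.getD_cons_succ]
      rw [ih i' (by simpa using hi)]
      simp

theorem bsB_spec (durs : List Int) (day : Int)
    (hpw : durs.Pairwise (· ≤ ·)) :
    ∀ lo hi : Nat, hi ≤ durs.length → lo ≤ hi →
      (∀ j (hj : j < durs.length), j < lo → durs[j] < day) →
      (∀ j (hj : j < durs.length), hi ≤ j → day ≤ durs[j]) →
      bsB durs day lo hi ≤ durs.length ∧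
      (∀ j (hj : j < durs.length), j < bsB durs day lo hi → durs[j] < day) ∧
      (∀ j (hj : j < durs.length), bsB durs day lo hi ≤ j → day ≤ durs[j]) := by
  have hmono : ∀ i j (hi : i < durs.length) (hj : j < durs.length), i ≤ j → durs[i] ≤ durs[j] := by
    intro i j hi hj hij
    rcases Nat.lt_or_ge i j with h | h
    · exact (List.pairwise_iff_getElem.mp hpw) i j hi hj h
    · have : i = j := by omega
      subst this; rfl
  intro lo hi
  induction' hmeas : hi - lo using Nat.strong_induction_on with d ih generalizing lo hi
  intro hhi hlohi hlo hhiP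
  by_cases h : lo < hi
  · rw [bsB]; simp only [if_pos h]
    have hmidlt : (lo + hi) / 2 < durs.length := by omega
    have hget : durs.getD ((lo + hi) / 2) 0 = durs[(lo + hi) / 2] := by
      simp [List.getD, List.getElem?_eq_getElem hmidlt]
    by_cases hc : durs.getD ((lo + hi) / 2) 0 < day
    · rw [if_pos hc]
      refine ih (hi - ((lo + hi) / 2 + 1)) (by omega) ((lo + hi) / 2 + 1) hi rfl hhi (by omega) ?_ hhiP
      intro j hj hjlt
      calc durs[j] ≤ durs[(lo + hi) / 2] := hmono _ _ hj hmidlt (by omega)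
        _ < day := by rwa [hget] at hc
    · rw [if_neg hc]
      refine ih ((lo + hi) / 2 - lo) (by omega) lo ((lo + hi) / 2) rfl (by omega) (by omega) hlo ?_
      intro j hj hjge
      calc day ≤ durs[(lo + hi) / 2] := by rw [← hget]; omega
        _ ≤ durs[j] := hmono _ _ hmidlt hj hjge
  · rw [bsB]; simp only [if_neg h]
    have : lo = hi := by omega
    subst this
    exact ⟨hhi, fun j hj hjl => hlo j hj hjl, fun j hj hjg => hhiP j hj hjg⟩

theorem sumA_eq_sum_map (day : Int) (meds : List (Int × Int)) :
    sumA day meds = (meds.map (fun m => if day ≤ m.1 then m.2 else 0)).sum := by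
  unfold sumA
  have : ∀ (l : List (Int × Int)) (a : Int),
      l.foldl (fun s m => if day ≤ m.1 then s + m.2 else s) a
        = a + (l.map (fun m => if day ≤ m.1 then m.2 else 0)).sum := by
    intro l
    induction l with
    | nil => simp
    | cons p t ih => intro a; simp only [List.foldl_cons, List.map_cons, List.sum_cons, ih]
                     split_ifs <;> ring
  simpa using this meds 0

-- the probe function of B computes exactly A's inner sum
theorem need_eq (k : Int) (medicines : List (Int × Int)) (day : Int) :
    (suffixSums (PySem.List.sorted medicines (fun m => m.1) false)).getD
      (bsB ((PySem.List.sorted medicines (fun m => m.1) false).map (fun m => m.1)) day 0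
        (PySem.List.sorted medicines (fun m => m.1) false).length) 0
      = sumA day medicines := by
  set meds := PySem.List.sorted medicines (fun m => m.1) false with hmeds
  set durs := meds.map (fun m => m.1) with hdurs
  have hlen : durs.length = meds.length := by simp [hdurs]
  have hpw : durs.Pairwise (· ≤ ·) := by
    rw [hdurs, hmeds]; exact PySem.List.sorted_map_key_pairwise medicines (fun m => m.1)
  obtain ⟨hr1, hr2, hr3⟩ := bsB_spec durs day hpw 0 meds.length (by omega) (by omega)
      (by intro j hj hlt; omega) (by intro j hj hge; omega)
  set r := bsB durs day 0 meds.length with hr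
  rw [suffixSums_getD meds r (by omega)]
  have hdget : ∀ j (hj : j < meds.length), durs[j]'(by omega) = (meds[j]).1 := by
    intro j hj; simp [hdurs]
  -- A's sum over the original list equals the same sum over the sorted list
  rw [sumA_eq_sum_map]
  have hperm : (meds.map (fun m => if day ≤ m.1 then m.2 else 0)).Perm
      (medicines.map (fun m => if day ≤ m.1 then m.2 else 0)) :=
    (PySem.List.sorted_perm medicines (fun m => m.1) false).map _
  rw [← hperm.sum_eq]
  -- split the sorted list at r
  conv_rhs => rw [← List.take_append_drop r meds]
  rw [List.map_append, List.sum_append]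
  have htake : ((meds.take r).map (fun m => if day ≤ m.1 then m.2 else 0)).sum = 0 := by
    apply List.sum_eq_zero
    intro x hx
    rw [List.mem_map] at hx
    obtain ⟨m, hm, hxm⟩ := hx
    rw [List.mem_iff_getElem] at hm
    obtain ⟨i, hi, hmi⟩ := hm
    have hlen2 : (meds.take r).length = min r meds.length := List.length_take
    have hir : i < r := by omega
    have hilen : i < meds.length := by omega
    have higet : (meds.take r)[i] = meds[i] := List.getElem_take
    have hlt : (meds[i]).1 < day := by
      rw [← hdget i hilen]
      exact hr2 i (by omega) hir
    rw [higet] at hmi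
    subst hmi; subst hxm
    simp [not_le.mpr hlt]
  have hdrop : ((meds.drop r).map (fun m => if day ≤ m.1 then m.2 else 0))
      = (meds.drop r).map (fun m => m.2) := by
    apply List.map_congr_left
    intro m hm
    rw [List.mem_iff_getElem] at hm
    obtain ⟨i, hi, hmi⟩ := hm
    have hlen2 : (meds.drop r).length = meds.length - r := List.length_drop
    have hilen : r + i < meds.length := by omega
    have hgd : (meds.drop r)[i] = meds[r + i] := List.getElem_drop ..
    have hge : day ≤ (meds[r + i]).1 := by
      rw [← hdget (r + i) hilen]
      exact hr3 (r + i) (by omega) (by omega)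
    rw [hgd] at hmi
    subst hmi
    simp [hge]
  rw [htake, hdrop, zero_add]

-- A's binary search from the interval (ng, ng + 2^j) equals B's bitwise descent over [j-1, …, 0]
theorem loop_eq (k : Int) (medicines : List (Int × Int)) (g : Int → Int)
    (hg : ∀ d, g d = sumA d medicines) :
    ∀ (j : Nat) (ng : Int),
      loopA k medicines (ng + 2 ^ j) ng =
        (PySem.List.pyRange ((j : Int) - 1) (-1) (-1)).foldl
          (fun ans i =>
            if g (ans + 2 ^ i.toNat) > k then ans + 2 ^ i.toNat else ans) ng + 1 := by
  intro j
  induction j with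
  | zero =>
    intro ng
    rw [PySem.List.pyRange_neg_one_eq_nil (by norm_num)]
    rw [loopA]
    simp
  | succ j ih =>
    intro ng
    have hj1 : ((j + 1 : Nat) : Int) - 1 = (j : Int) := by push_cast; ring
    rw [hj1, PySem.List.pyRange_neg_one_cons (by omega), List.foldl_cons]
    have htn : ((j : Int)).toNat = j := by simp
    have hpow : (2:Int) ^ 1 ≤ 2 ^ (j + 1) :=
      pow_le_pow_right₀ one_le_two (Nat.le_add_left 1 j)
    have h2le : (2:Int) ≤ 2 ^ (j + 1) := by simpa using hpow
    rw [loopA]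
    rw [dif_pos (show |ng + 2 ^ (j + 1) - ng| > 1 by rw [abs_of_pos] <;> omega)]
    have hmid : PySem.Int.floordiv (ng + 2 ^ (j + 1) + ng) 2 = ng + 2 ^ j := by
      have he : ng + 2 ^ (j + 1) + ng = 2 * (ng + 2 ^ j) := by ring
      rw [he]; unfold PySem.Int.floordiv; rw [Int.fdiv_eq_ediv]
      simp
    simp only [hmid, htn]
    by_cases hs : sumA (ng + 2 ^ j) medicines ≤ k
    · rw [if_pos hs]
      have hng : ¬ (g (ng + 2 ^ j) > k) := by rw [hg]; omega
      rw [if_neg hng]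
      exact ih ng
    · rw [if_neg hs]
      have hgt : g (ng + 2 ^ j) > k := by rw [hg]; omega
      rw [if_pos hgt]
      have h2 : ng + 2 ^ (j + 1) = (ng + 2 ^ j) + 2 ^ j := by ring
      rw [h2]
      exact ih (ng + 2 ^ j)

-- ===== VERDICT (by name: the statement is the Claim_ definition above) =====
theorem find_day_spec : Claim_equal_find_day := by
  intro n k medicines _
  unfold Spec_find_day find_day find_day_alt
  have h30 : (1073741824 : Int) = 0 + 2 ^ (30 : Nat) := by norm_num
  rw [h30, loop_eq k medicines _ (fun d => need_eq k medicines d) 30 0]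
  norm_num
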